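-- pv_equiv track=rewrite | github.com/DeDe136/Encryption-Decryption | algorithms/playfair/playfair_cipher.py | process_plaintext_5x5
-- ===== SOURCE A (Python) =====
-- def is_ascii_letter(char):
--     """Kiểm tra ký tự A-Z không dấu"""
--     return 'A' <= char.upper() <= 'Z'
--
-- def process_plaintext_5x5(text, sep1='X', sep2='Y'):
--     """Xử lý văn bản 5x5: Tách cặp, chèn sep1/sep2 nếu trùng hoặc lẻ"""
--     filtered_text = []
--     for char in text:
--         if is_ascii_letter(char):
--             filtered_text.append(char.upper().replace('J', 'I'))
--     text = ''.join(filtered_text)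
--
--     pairs = []
--     inserted_indices = []
--     i = 0
--     char_count = 0
--
--     while i < len(text):
--         a = text[i]
--         if i + 1 < len(text):
--             b = text[i + 1]
--             if a == b:
--                 if a == sep1: pairs.append(a + sep2)
--                 else: pairs.append(a + sep1)
--                 inserted_indices.append(char_count + 1)
--                 i += 1
--                 char_count += 2
--             else:
--                 pairs.append(a + b)
--                 i += 2
--                 char_count += 2
--         else:
--             if a == sep1: pairs.append(a + sep2)
--             else: pairs.append(a + sep1)
--             inserted_indices.append(char_count + 1)
--             i += 1
--             char_count += 2
--
--     return pairs, inserted_indices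
-- ===== SOURCE B (Python) =====
-- def process_plaintext_5x5(text, sep1='X', sep2='Y'):
--     """Streaming-automaton version: clean the text, then fold over the clean
--     characters one at a time with a 'pending' state (no index walk, no
--     lookahead, no running char counter); inserted indices are derived
--     afterwards from the flag list as 2*k+1."""
--     clean = [c.upper().replace('J', 'I') for c in text if 'A' <= c.upper() <= 'Z']
--     pairs, flags, pending = [], [], None
--     for c in clean:
--         if pending is None:
--             pending = c
--         elif c == pending:
--             pairs.append(pending + (sep2 if pending == sep1 else sep1))
--             flags.append(True)
--             pending = c
--         else:
--             pairs.append(pending + c)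
--             flags.append(False)
--             pending = None
--     if pending is not None:
--         pairs.append(pending + (sep2 if pending == sep1 else sep1))
--         flags.append(True)
--     return pairs, [2 * k + 1 for k, f in enumerate(flags) if f]
-- ===== Notes on version B (the rewrite author's own statement) =====
-- stated objective: alternative
-- what changed: B replaces A's index-walk with lookahead text[i+1] and a running char_count by a streaming fold over single characters carrying only an optional 'pending' character, with inserted indices derived afterwards from a flag list as 2*k+1.
import Mathlib
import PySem

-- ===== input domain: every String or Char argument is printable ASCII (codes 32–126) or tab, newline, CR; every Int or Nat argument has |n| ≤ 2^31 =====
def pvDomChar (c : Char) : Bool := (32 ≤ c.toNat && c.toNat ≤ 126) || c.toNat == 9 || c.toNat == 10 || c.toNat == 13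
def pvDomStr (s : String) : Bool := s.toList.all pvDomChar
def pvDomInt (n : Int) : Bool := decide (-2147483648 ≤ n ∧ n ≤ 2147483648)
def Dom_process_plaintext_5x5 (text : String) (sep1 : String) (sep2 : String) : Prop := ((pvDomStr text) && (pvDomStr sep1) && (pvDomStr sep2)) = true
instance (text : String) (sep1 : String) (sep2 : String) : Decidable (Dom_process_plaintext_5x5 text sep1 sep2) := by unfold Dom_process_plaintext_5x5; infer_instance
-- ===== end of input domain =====

-- B replaces A's index walk (lookahead text[i+1], running char_count) by a fold with a
-- 'pending' character state plus a separate index-derivation pass; objective: alternative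
-- decomposition of the same cost.

-- ===== PORT A =====
-- 'A' <= char.upper() <= 'Z' on a one-char string; char-level comparison is exact on the ASCII domain
def pvIsAsciiLetterA (c : Char) : Bool :=
  ('A' ≤ PySem.Chars.upperChar c) && (PySem.Chars.upperChar c ≤ 'Z')

-- char.upper().replace('J','I') on a one-char string
def pvUpJA (c : Char) : Char :=
  if PySem.Chars.upperChar c == 'J' then 'I' else PySem.Chars.upperChar c

-- the while-loop of A: state = remaining chars, char_count, pairs, inserted_indices
def pvLoopA (sep1 sep2 : String) (l : List Char) (cc : Int)
    (pairs : List String) (idx : List Int) : List String × List Int :=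
  match l with
  | [] => (pairs, idx)
  | [a] =>
      -- i + 1 >= len(text): append a + (sep), record index, i += 1 → loop ends
      let pr := if String.ofList [a] == sep1 then String.ofList [a] ++ sep2 else String.ofList [a] ++ sep1
      pvLoopA sep1 sep2 [] (cc + 2) (pairs ++ [pr]) (idx ++ [cc + 1])
  | a :: b :: t =>
      if a == b then
        let pr := if String.ofList [a] == sep1 then String.ofList [a] ++ sep2 else String.ofList [a] ++ sep1
        pvLoopA sep1 sep2 (b :: t) (cc + 2) (pairs ++ [pr]) (idx ++ [cc + 1])
      else
        pvLoopA sep1 sep2 t (cc + 2) (pairs ++ [String.ofList [a] ++ String.ofList [b]]) idx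

def process_plaintext_5x5 (text : String) (sep1 : String) (sep2 : String) : List String × List Int :=
  let filtered := text.toList.foldl
    (fun acc c => if pvIsAsciiLetterA c then acc ++ [pvUpJA c] else acc) []
  pvLoopA sep1 sep2 filtered 0 [] []

-- ===== PORT B =====
def pvUpJB (c : Char) : Char :=
  if PySem.Chars.upperChar c == 'J' then 'I' else PySem.Chars.upperChar c

def pvIsLetterB (c : Char) : Bool :=
  ('A' ≤ PySem.Chars.upperChar c) && (PySem.Chars.upperChar c ≤ 'Z')

-- one step of B's for-loop: state = (pairs, flags, pending)
def pvStepB (sep1 sep2 : String) (st : List String × List Bool × Option Char) (c : Char) :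
    List String × List Bool × Option Char :=
  match st with
  | (pairs, flags, none) => (pairs, flags, some c)
  | (pairs, flags, some p) =>
      if c == p then
        (pairs ++ [String.ofList [p] ++ (if String.ofList [p] == sep1 then sep2 else sep1)],
         flags ++ [true], some c)
      else
        (pairs ++ [String.ofList [p] ++ String.ofList [c]], flags ++ [false], none)

def process_plaintext_5x5_alt (text : String) (sep1 : String) (sep2 : String) : List String × List Int :=
  let clean := (text.toList.filter pvIsLetterB).map pvUpJB
  let st := clean.foldl (pvStepB sep1 sep2) ([], [], none)
  let fin : List String × List Bool :=
    match st.2.2 with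
    | some p => (st.1 ++ [String.ofList [p] ++ (if String.ofList [p] == sep1 then sep2 else sep1)],
                 st.2.1 ++ [true])
    | none => (st.1, st.2.1)
  (fin.1, ((PySem.List.enumerate fin.2 0).filter (fun kf => kf.2)).map (fun kf => 2 * kf.1 + 1))

-- ===== PRECONDITION & SPEC =====
def Spec_process_plaintext_5x5 (text : String) (sep1 : String) (sep2 : String) (out : List String × List Int) : Prop := out = process_plaintext_5x5_alt text sep1 sep2
instance (text : String) (sep1 : String) (sep2 : String) (out : List String × List Int) : Decidable (Spec_process_plaintext_5x5 text sep1 sep2 out) := by unfold Spec_process_plaintext_5x5; infer_instance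

-- ===== CLAIM =====
def Claim_equal_process_plaintext_5x5 : Prop := ∀ (text : String) (sep1 : String) (sep2 : String), Dom_process_plaintext_5x5 text sep1 sep2 → Spec_process_plaintext_5x5 text sep1 sep2 (process_plaintext_5x5 text sep1 sep2)

-- ===== LEMMAS AND PROOFS =====

-- proof-only intermediate: the tagged digraph list of the clean text
def pvDg (sep1 sep2 : String) : List Char → List (String × Bool)
  | [] => []
  | [a] => [(String.ofList [a] ++ (if String.ofList [a] == sep1 then sep2 else sep1), true)]
  | a :: b :: t =>
      if a == b then
        (String.ofList [a] ++ (if String.ofList [a] == sep1 then sep2 else sep1), true)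
          :: pvDg sep1 sep2 (b :: t)
      else
        (String.ofList [a] ++ String.ofList [b], false) :: pvDg sep1 sep2 t

theorem pvPadEq (a : Char) (sep1 sep2 : String) :
    (if String.ofList [a] = sep1 then String.ofList [a] ++ sep2 else String.ofList [a] ++ sep1)
      = String.ofList [a] ++ (if String.ofList [a] = sep1 then sep2 else sep1) := by
  split_ifs <;> rfl

-- A's while-loop with char_count = 2*k equals the digraph list read off from position k
theorem pvLoopA_eq_dg (sep1 sep2 : String) (l : List Char) :
    ∀ (k : Int) (pairs : List String) (idx : List Int),
      pvLoopA sep1 sep2 l (2 * k) pairs idx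
        = (pairs ++ (pvDg sep1 sep2 l).map Prod.fst,
           idx ++ ((PySem.List.enumerate ((pvDg sep1 sep2 l).map Prod.snd) k).filter
                     (fun kf => kf.2)).map (fun kf => 2 * kf.1 + 1)) := by
  induction l using pvDg.induct with
  | case1 => intro k pairs idx; simp [pvLoopA, pvDg, PySem.List.enumerate_nil]
  | case2 a =>
      intro k pairs idx
      simp [pvLoopA, pvDg, PySem.List.enumerate_cons, PySem.List.enumerate_nil, pvPadEq]
  | case3 a b t h ih =>
      intro k pairs idx
      have h2 : 2 * k + 2 = 2 * (k + 1) := by ring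
      simp only [pvLoopA, pvDg, h, if_true, h2, ih, List.map_cons,
        PySem.List.enumerate_cons, List.filter_cons, List.map_cons]
      simp [pvPadEq]
  | case4 a b t h ih =>
      intro k pairs idx
      have hab : (a == b) = false := by
        cases e : a == b
        · rfl
        · exact absurd e h
      have h2 : 2 * k + 2 = 2 * (k + 1) := by ring
      simp only [pvLoopA, pvDg, hab, if_false, Bool.false_eq_true, h2, ih, List.map_cons,
        PySem.List.enumerate_cons, List.filter_cons]
      simp

-- B's fold from state (pairs, flags, none), plus the finalizer, appends the digraph list
theorem pvFoldB_eq_dg (sep1 sep2 : String) (l : List Char) :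
    ∀ (pairs : List String) (flags : List Bool),
      (match (l.foldl (pvStepB sep1 sep2) (pairs, flags, none)).2.2 with
        | some p => ((l.foldl (pvStepB sep1 sep2) (pairs, flags, none)).1
                       ++ [String.ofList [p] ++ (if String.ofList [p] == sep1 then sep2 else sep1)],
                     (l.foldl (pvStepB sep1 sep2) (pairs, flags, none)).2.1 ++ [true])
        | none => ((l.foldl (pvStepB sep1 sep2) (pairs, flags, none)).1,
                   (l.foldl (pvStepB sep1 sep2) (pairs, flags, none)).2.1)
        : List String × List Bool)
        = (pairs ++ (pvDg sep1 sep2 l).map Prod.fst,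
           flags ++ (pvDg sep1 sep2 l).map Prod.snd) := by
  induction l using pvDg.induct with
  | case1 => intro pairs flags; simp [pvDg, pvStepB]
  | case2 a =>
      intro pairs flags
      simp only [List.foldl_cons, List.foldl_nil, pvStepB]
      simp [pvDg]
  | case3 a b t h ih =>
      intro pairs flags
      have he : a = b := by exact beq_iff_eq.mp h
      subst he
      simpa [pvDg, pvStepB, List.append_assoc] using
        ih (pairs ++ [String.ofList [a] ++ (if String.ofList [a] == sep1 then sep2 else sep1)])
           (flags ++ [true])
  | case4 a b t h ih =>
      intro pairs flags
      have hne : ¬ a = b := fun e => h (beq_iff_eq.mpr e)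
      have hab : (b == a) = false := by
        cases e : b == a
        · rfl
        · exact absurd (beq_iff_eq.mp e).symm hne
      -- foldl over (a :: b :: t) from pending none: first step stores a, second emits
      simp only [List.foldl_cons, pvStepB, hab, Bool.false_eq_true, if_false]
      simpa [pvDg, hne, List.append_assoc] using
        ih (pairs ++ [String.ofList [a] ++ String.ofList [b]]) (flags ++ [false])

-- ===== VERDICT =====
theorem process_plaintext_5x5_spec : Claim_equal_process_plaintext_5x5 := by
  intro text sep1 sep2 _
  unfold Spec_process_plaintext_5x5 process_plaintext_5x5 process_plaintext_5x5_alt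
  rw [PySem.List.foldl_append_if]
  have h0 : (0 : Int) = 2 * 0 := by ring
  rw [show pvIsAsciiLetterA = pvIsLetterB from rfl, show pvUpJA = pvUpJB from rfl, h0,
    pvLoopA_eq_dg]
  have hb := pvFoldB_eq_dg sep1 sep2 ((text.toList.filter pvIsLetterB).map pvUpJB) [] []
  simp only [List.nil_append] at hb
  simp only [hb]
  norm_num
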